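-- pv_equiv track=rewrite | github.com/konszymanski/leetcode-dataset | obfuscated_solutions/python/2441-largest-positive-integer-that-exists-with-its-negative/solution_2_aug_expand.py | findMaxK
-- ===== SOURCE A (Python) =====
-- from typing import List
--
-- def findMaxK(nums: List[int]) ->int:
--     nums.sort()
--     lo = 0
--     hi = len(nums) - 1
--     while lo < hi:
--         if -nums[lo] == nums[hi]:
--             return nums[hi]
--         elif -nums[lo] > nums[hi]:
--             lo = lo + 1
--         else:
--             hi = hi - 1
--     return -1
-- ===== SOURCE B (Python) =====
-- def findMaxK(nums):
--     seen = set(nums)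
--     ans = -1
--     for x in nums:
--         if x > 0 and -x in seen:
--             ans = max(ans, x)
--     return ans
-- ===== Notes on version B (the rewrite author's own statement) =====
-- stated objective: simpler
-- what changed: Replaced sort + two-pointer convergence with one set built in a pass and a single linear scan maintaining a running maximum (B also does not mutate nums, while A sorts it in place).
-- intended difference: On lists containing 0 at least twice and no positive x with -x also present, A returns 0 while B returns -1; the problem asks for the largest POSITIVE integer k with -k present, and 0 is not positive, so -1 is the intended answer. — e.g. on findMaxK([0, 0]): A returns 0, B returns -1
import Mathlib
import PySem

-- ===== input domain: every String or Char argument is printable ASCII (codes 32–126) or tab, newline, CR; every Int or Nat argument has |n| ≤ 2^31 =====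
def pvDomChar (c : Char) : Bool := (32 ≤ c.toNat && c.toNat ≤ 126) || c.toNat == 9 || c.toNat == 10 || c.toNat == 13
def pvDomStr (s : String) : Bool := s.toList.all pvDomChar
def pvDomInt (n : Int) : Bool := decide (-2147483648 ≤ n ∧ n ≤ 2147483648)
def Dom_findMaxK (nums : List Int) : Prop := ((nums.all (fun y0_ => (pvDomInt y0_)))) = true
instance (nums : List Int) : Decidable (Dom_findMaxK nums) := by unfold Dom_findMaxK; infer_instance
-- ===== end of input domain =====

-- B replaces A's sort + two-pointer convergence by one membership set and a single linear scan
-- keeping a running maximum (simpler); the equivalence is about the RETURN value only: A sorts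
-- nums in place, B does not mutate its argument.

-- ===== PORT A =====
-- A's while-loop, structurally recursive on a fuel counter; fuel starts at nums.length ≥ hi - lo and
-- each iteration shrinks hi - lo by one, so the 0-fuel branch is unreachable while lo < hi.
-- lo and hi are Nats: in Python both stay ≥ 0 (lo only increments from 0; 'hi - 1' only happens under
-- lo < hi, so hi ≥ 1 there; for the empty list Python's hi = -1 and Nat's hi = 0 both fail 'lo < hi' at once).
-- Whenever s[lo]/s[hi] are read we have 0 ≤ lo < hi ≤ len - 1, so List.getD is exact (Python never raises here).
def loopA (s : List Int) : Nat → Nat → Nat → Int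
  | 0, _, _ => -1
  | fuel + 1, lo, hi =>
    if lo < hi then
      if -(s.getD lo 0) = s.getD hi 0 then s.getD hi 0
      else if -(s.getD lo 0) > s.getD hi 0 then loopA s fuel (lo + 1) hi
      else loopA s fuel lo (hi - 1)
    else -1

def findMaxK (nums : List Int) : Int :=
  let s := PySem.List.sorted nums (fun x => x) false
  loopA s nums.length 0 (nums.length - 1)

-- ===== PORT B =====
def findMaxK_alt (nums : List Int) : Int :=
  let seen : PySem.Set Int := PySem.Set.ofList nums
  nums.foldl (fun ans x => if 0 < x ∧ PySem.Set.contains seen (-x) then max ans x else ans) (-1)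

-- ===== PRECONDITION & SPEC =====
-- On lists containing 0 at least twice and no positive x with -x also present, A returns 0 while B
-- returns -1; the problem asks for the largest POSITIVE k with -k present and 0 is not positive, so -1 is intended.
def D_findMaxK (nums : List Int) : Prop :=
  2 ≤ nums.count 0 ∧ ¬ ∃ x ∈ nums, 0 < x ∧ -x ∈ nums
instance (nums : List Int) : Decidable (D_findMaxK nums) := by unfold D_findMaxK; infer_instance

def Spec_findMaxK (nums : List Int) (out : Int) : Prop := ¬ D_findMaxK nums → out = findMaxK_alt nums
instance (nums : List Int) (out : Int) : Decidable (Spec_findMaxK nums out) := by unfold Spec_findMaxK; infer_instance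

def pvDiffWitness_findMaxK : List Int := [0, 0]
def pvDiffWitnessOut_findMaxK : Int × Int := (0, -1)

-- ===== CLAIM (what is proved, stated in full; the proofs are below) =====
def Claim_unchanged_findMaxK : Prop := ∀ (nums : List Int), Dom_findMaxK nums → Spec_findMaxK nums (findMaxK nums)
def Claim_changed_findMaxK : Prop := Dom_findMaxK (pvDiffWitness_findMaxK) ∧ D_findMaxK (pvDiffWitness_findMaxK) ∧ findMaxK (pvDiffWitness_findMaxK) = pvDiffWitnessOut_findMaxK.1 ∧ findMaxK_alt (pvDiffWitness_findMaxK) = pvDiffWitnessOut_findMaxK.2 ∧ pvDiffWitnessOut_findMaxK.1 ≠ pvDiffWitnessOut_findMaxK.2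
def Claim_exact_findMaxK : Prop := ∀ (nums : List Int), Dom_findMaxK nums → D_findMaxK nums → findMaxK nums ≠ findMaxK_alt nums

-- ===== LEMMAS AND PROOFS =====

lemma foldB_le_init (seen : List Int) (l : List Int) : ∀ acc : Int,
    acc ≤ l.foldl (fun ans x => if 0 < x ∧ PySem.Set.contains seen (-x) then max ans x else ans) (acc) := by
  induction l with
  | nil => intro acc; simp
  | cons x t ih =>
    intro acc
    simp only [List.foldl_cons]
    split
    · exact le_trans (le_max_left _ _) (ih _)
    · exact ih _

lemma foldB_le_mem (seen : List Int) (l : List Int) : ∀ (acc x : Int), x ∈ l →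
    (0 < x ∧ PySem.Set.contains seen (-x) = true) →
    x ≤ l.foldl (fun ans x => if 0 < x ∧ PySem.Set.contains seen (-x) then max ans x else ans) (acc) := by
  induction l with
  | nil => intro acc x hx; simp at hx
  | cons y t ih =>
    intro acc x hx hc
    simp only [List.foldl_cons]
    rcases List.mem_cons.mp hx with rfl | hx'
    · rw [if_pos hc]
      exact le_trans (le_max_right _ _) (foldB_le_init seen t _)
    · exact ih _ _ hx' hc

lemma foldB_cases (seen : List Int) (l : List Int) : ∀ acc : Int,
    l.foldl (fun ans x => if 0 < x ∧ PySem.Set.contains seen (-x) then max ans x else ans) (acc) = acc ∨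
    (l.foldl (fun ans x => if 0 < x ∧ PySem.Set.contains seen (-x) then max ans x else ans) (acc) ∈ l ∧
      (0 < l.foldl (fun ans x => if 0 < x ∧ PySem.Set.contains seen (-x) then max ans x else ans) (acc) ∧
       PySem.Set.contains seen (-(l.foldl (fun ans x => if 0 < x ∧ PySem.Set.contains seen (-x) then max ans x else ans) (acc))) = true)) := by
  induction l with
  | nil => intro acc; left; rfl
  | cons y t ih =>
    intro acc
    simp only [List.foldl_cons]
    by_cases hc : (0 < y ∧ PySem.Set.contains seen (-y) = true)
    · rw [if_pos hc]
      rcases ih (max acc y) with h | ⟨hm, hp⟩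
      · rcases max_choice acc y with hmx | hmx
        · left; rw [h, hmx]
        · right
          refine ⟨?_, ?_⟩
          · rw [h, hmx]; exact List.mem_cons_self
          · rw [h, hmx]; exact hc
      · right; exact ⟨List.mem_cons_of_mem _ hm, hp⟩
    · rw [if_neg hc]
      rcases ih acc with h | ⟨hm, hp⟩
      · left; exact h
      · right; exact ⟨List.mem_cons_of_mem _ hm, hp⟩

lemma loopA_eq (s : List Int) (hmono : ∀ a b : Nat, a ≤ b → b < s.length → s.getD a 0 ≤ s.getD b 0) (K : Int)
    (hub : ∀ a b : Nat, a < b → b < s.length → s.getD a 0 = -(s.getD b 0) → s.getD b 0 ≤ K) :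
    ∀ (fuel lo hi i j : Nat), hi - lo ≤ fuel → hi < s.length →
      lo ≤ i → i < j → j ≤ hi → s.getD i 0 = -K → s.getD j 0 = K →
      loopA s fuel lo hi = K := by
  intro fuel
  induction fuel with
  | zero => intro lo hi i j hf _ hli hij hjh _ _; omega
  | succ n ih =>
    intro lo hi i j hf hhi hli hij hjh hiK hjK
    have hlh : lo < hi := by omega
    rw [loopA, if_pos hlh]
    have hKj : K ≤ s.getD hi 0 := hjK ▸ hmono j hi hjh hhi
    by_cases heq : -(s.getD lo 0) = s.getD hi 0
    · rw [if_pos heq]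
      have h1 : s.getD lo 0 = -(s.getD hi 0) := by omega
      have h2 : s.getD hi 0 ≤ K := hub lo hi hlh hhi h1
      omega
    · rw [if_neg heq]
      by_cases hgt : -(s.getD lo 0) > s.getD hi 0
      · rw [if_pos hgt]
        -- i ≠ lo: else -s[lo] = K ≤ s[hi] contradicting hgt
        have hilo : lo < i := by
          rcases Nat.lt_or_ge lo i with h | h
          · exact h
          · exfalso
            have : i = lo := by omega
            subst this
            have : -(s.getD i 0) = K := by omega
            omega
        exact ih (lo + 1) hi i j (by omega) hhi (by omega) hij hjh hiK hjK
      · rw [if_neg hgt]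
        -- j ≠ hi: else s[hi] = K = -s[i] ≥ -s[lo], contradicting -s[lo] < s[hi]
        have hlt : -(s.getD lo 0) < s.getD hi 0 := by omega
        have hjhi : j < hi := by
          rcases Nat.lt_or_ge j hi with h | h
          · exact h
          · exfalso
            have hj : j = hi := by omega
            subst hj
            have h1 : s.getD lo 0 ≤ s.getD i 0 := hmono lo i hli (by omega)
            omega
        exact ih lo (hi - 1) i j (by omega) (by omega) hli hij (by omega) hiK hjK

lemma loopA_none (s : List Int) (hno : ∀ a b : Nat, a < b → b < s.length → s.getD a 0 ≠ -(s.getD b 0)) :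
    ∀ (fuel lo hi : Nat), hi < s.length → loopA s fuel lo hi = -1 := by
  intro fuel
  induction fuel with
  | zero => intro lo hi _; rfl
  | succ n ih =>
    intro lo hi hhi
    rw [loopA]
    by_cases hlh : lo < hi
    · rw [if_pos hlh]
      have hne : -(s.getD lo 0) ≠ s.getD hi 0 := by
        intro h
        exact hno lo hi hlh hhi (by omega)
      rw [if_neg hne]
      by_cases hgt : -(s.getD lo 0) > s.getD hi 0
      · rw [if_pos hgt]; exact ih (lo + 1) hi hhi
      · rw [if_neg hgt]; exact ih lo (hi - 1) (by omega)
    · rw [if_neg hlh]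

-- two distinct positions holding 0 give count ≥ 2
lemma two_le_count_of_indices (l : List Int) (a b : Nat) (hab : a < b) (hb : b < l.length)
    (ha0 : l.getD a 0 = 0) (hb0 : l.getD b 0 = 0) : 2 ≤ l.count 0 := by
  have ha : a < l.length := lt_trans hab hb
  rw [List.getD_eq_getElem _ _ ha] at ha0
  rw [List.getD_eq_getElem _ _ hb] at hb0
  refine List.duplicate_iff_two_le_count.mp ?_
  refine List.duplicate_iff_exists_distinct_get.mpr ⟨⟨a, ha⟩, ⟨b, hb⟩, ?_, ?_, ?_⟩
  · exact hab
  · simp [List.get_eq_getElem, ha0]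
  · simp [List.get_eq_getElem, hb0]

-- count ≥ 2 gives two distinct positions holding 0
lemma indices_of_two_le_count (l : List Int) (h : 2 ≤ l.count 0) :
    ∃ a b : Nat, a < b ∧ b < l.length ∧ l.getD a 0 = 0 ∧ l.getD b 0 = 0 := by
  have hd := List.duplicate_iff_two_le_count.mpr h
  obtain ⟨n, m, hnm, hn0, hm0⟩ := List.duplicate_iff_exists_distinct_get.mp hd
  refine ⟨n.1, m.1, hnm, m.2, ?_, ?_⟩
  · rw [List.getD_eq_getElem _ _ n.2]; simpa [List.get_eq_getElem] using hn0.symm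
  · rw [List.getD_eq_getElem _ _ m.2]; simpa [List.get_eq_getElem] using hm0.symm

-- basic facts about s := sorted nums
lemma s_length (nums : List Int) : (PySem.List.sorted nums (fun x => x) false).length = nums.length :=
  PySem.List.length_sorted nums (fun x => x) false

lemma s_mono (nums : List Int) : ∀ a b : Nat, a ≤ b →
    b < (PySem.List.sorted nums (fun x => x) false).length →
    (PySem.List.sorted nums (fun x => x) false).getD a 0 ≤ (PySem.List.sorted nums (fun x => x) false).getD b 0 := by
  intro a b hab hb
  rw [List.getD_eq_getElem _ _ (lt_of_le_of_lt hab hb), List.getD_eq_getElem _ _ hb]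
  exact PySem.List.sorted_id_getElem_mono nums hab hb

lemma s_getD_mem (nums : List Int) (a : Nat) (ha : a < (PySem.List.sorted nums (fun x => x) false).length) :
    (PySem.List.sorted nums (fun x => x) false).getD a 0 ∈ nums := by
  rw [List.getD_eq_getElem _ _ ha]
  exact (PySem.List.mem_sorted nums (fun x => x) false _).mp (List.getElem_mem ha)

lemma s_count (nums : List Int) (x : Int) :
    (PySem.List.sorted nums (fun x => x) false).count x = nums.count x :=
  (PySem.List.sorted_perm nums (fun x => x) false).count_eq x

-- B returns -1 when no positive matched pair exists
lemma alt_eq_neg_one (nums : List Int) (hnoex : ¬ ∃ x ∈ nums, 0 < x ∧ -x ∈ nums) :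
    findMaxK_alt nums = -1 := by
  simp only [findMaxK_alt]
  rcases foldB_cases (PySem.Set.ofList nums) nums (-1) with h | ⟨hm, hp, hc⟩
  · exact h
  · exfalso
    exact hnoex ⟨_, hm, hp, by simpa [PySem.Set.mem_ofList] using hc⟩

-- A returns 0 inside D_
lemma a_eq_zero (nums : List Int) (hcount : 2 ≤ nums.count 0)
    (hnoex : ¬ ∃ x ∈ nums, 0 < x ∧ -x ∈ nums) : findMaxK nums = 0 := by
  simp only [findMaxK]
  have hlen := s_length nums
  obtain ⟨a, b, hab, hb, ha0, hb0⟩ := indices_of_two_le_count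
    (PySem.List.sorted nums (fun x => x) false) (by rw [s_count]; exact hcount)
  refine loopA_eq _ (s_mono nums) 0 ?_ nums.length 0 (nums.length - 1) a b (by omega) (by omega)
    (by omega) hab (by omega) (by rw [ha0]; ring) hb0
  intro p q hpq hq hpqeq
  by_contra hgt0
  have hgt : (0:Int) < (PySem.List.sorted nums (fun x => x) false).getD q 0 := lt_of_not_ge hgt0
  exact hnoex ⟨_, s_getD_mem nums q hq, hgt, by rw [← hpqeq]; exact s_getD_mem nums p (by omega)⟩

-- main agreement outside D_
lemma main_eq (nums : List Int) (hnD : ¬ (2 ≤ nums.count 0 ∧ ¬ ∃ x ∈ nums, 0 < x ∧ -x ∈ nums)) :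
    findMaxK nums = findMaxK_alt nums := by
  by_cases hex : ∃ x ∈ nums, 0 < x ∧ -x ∈ nums
  · -- a positive matched pair exists; let r be B's result and show both equal r
    set r := findMaxK_alt nums with hr
    have hrfold : r = nums.foldl
        (fun ans x => if 0 < x ∧ PySem.Set.contains (PySem.Set.ofList nums) (-x) then max ans x else ans) (-1) := by
      simp only [hr, findMaxK_alt]
    obtain ⟨g, hg, hg1, hg2⟩ := hex
    have hgr : g ≤ r := by
      rw [hrfold]
      exact foldB_le_mem _ nums (-1) g hg ⟨hg1, by simpa [PySem.Set.mem_ofList] using hg2⟩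
    have hrpos : 0 < r := lt_of_lt_of_le hg1 hgr
    have hrgood : r ∈ nums ∧ 0 < r ∧ -r ∈ nums := by
      rcases foldB_cases (PySem.Set.ofList nums) nums (-1) with h | ⟨hm, hp, hc⟩
      · rw [hrfold] at hrpos; omega
      · exact ⟨by rw [hrfold]; exact hm, by rw [hrfold]; exact hp,
          by rw [hrfold]; simpa [PySem.Set.mem_ofList] using hc⟩
    -- maximality of r over matched positive values
    have hmaxr : ∀ v : Int, v ∈ nums → 0 < v → -v ∈ nums → v ≤ r := by
      intro v hv hv1 hv2
      rw [hrfold]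
      exact foldB_le_mem _ nums (-1) v hv ⟨hv1, by simpa [PySem.Set.mem_ofList] using hv2⟩
    simp only [findMaxK]
    have hlen := s_length nums
    -- indices of -r and r in s
    obtain ⟨i, hi, hieq⟩ := List.mem_iff_getElem.mp ((PySem.List.mem_sorted nums (fun x => x) false (-r)).mpr hrgood.2.2)
    obtain ⟨j, hj, hjeq⟩ := List.mem_iff_getElem.mp ((PySem.List.mem_sorted nums (fun x => x) false r).mpr hrgood.1)
    have hij : i < j := by
      by_contra h
      have := s_mono nums j i (Nat.le_of_not_lt h) hi
      rw [List.getD_eq_getElem _ _ hi, List.getD_eq_getElem _ _ hj, hieq, hjeq] at this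
      omega
    have hnums_ne : 0 < nums.length := List.length_pos_iff.mpr (List.ne_nil_of_mem hg)
    refine loopA_eq _ (s_mono nums) r ?_ nums.length 0 (nums.length - 1) i j (by omega) (by omega)
      (by omega) hij (by omega) (by rw [List.getD_eq_getElem _ _ hi]; exact hieq)
      (by rw [List.getD_eq_getElem _ _ hj]; exact hjeq)
    intro p q hpq hq hpqeq
    have hvmem := s_getD_mem nums q hq
    have hnegmem : -((PySem.List.sorted nums (fun x => x) false).getD q 0) ∈ nums := by
      rw [← hpqeq]; exact s_getD_mem nums p (by omega)
    by_cases hv : 0 < (PySem.List.sorted nums (fun x => x) false).getD q 0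
    · exact hmaxr _ hvmem hv hnegmem
    · omega
  · -- no positive matched pair: B gives -1; ¬D_ forces count 0 < 2, so A's loop never fires
    have hcount : nums.count 0 < 2 := by
      by_contra h
      exact hnD ⟨by omega, hex⟩
    rw [alt_eq_neg_one nums hex]
    simp only [findMaxK]
    have hlen := s_length nums
    rcases Nat.eq_zero_or_pos nums.length with h0 | h0
    · have : nums = [] := List.length_eq_zero_iff.mp h0
      subst this; rfl
    refine loopA_none _ ?_ nums.length 0 (nums.length - 1) (by omega)
    intro a b hab hb heq
    have hvmem := s_getD_mem nums b hb
    have hnegmem : -((PySem.List.sorted nums (fun x => x) false).getD b 0) ∈ nums := by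
      rw [← heq]; exact s_getD_mem nums a (by omega)
    rcases lt_trichotomy 0 ((PySem.List.sorted nums (fun x => x) false).getD b 0) with hv | hv | hv
    · exact hex ⟨_, hvmem, hv, hnegmem⟩
    · have h2 : 2 ≤ (PySem.List.sorted nums (fun x => x) false).count 0 :=
        two_le_count_of_indices _ a b hab hb (by omega) (by omega)
      rw [s_count] at h2
      omega
    · have := s_mono nums a b (le_of_lt hab) hb
      omega

-- ===== VERDICT (by name: the statement is the Claim_ definition above) =====
theorem findMaxK_spec : Claim_unchanged_findMaxK := by
  intro nums _ hnD
  exact main_eq nums hnD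

theorem findMaxK_changed : Claim_changed_findMaxK := by
  unfold Claim_changed_findMaxK; decide

theorem findMaxK_tight : Claim_exact_findMaxK := by
  intro nums _ hD
  obtain ⟨h1, h2⟩ := hD
  rw [a_eq_zero nums h1 h2, alt_eq_neg_one nums h2]
  decide
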